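-- pv_equiv track=rewrite | github.com/agileminor/shared_files | exercises/vac_plan.py | solution
-- ===== SOURCE A (Python) =====
-- def solution(A):
-- # write your code in Python 2.7
--     attract_set = set(A)
--     #print attract_set
--     left_set = set([])
--     left_index = 0
--     for item in A:
--         if left_set.issuperset(attract_set):
--             break
--         left_set.update([item])
--         left_index += 1
--     right_index = len(A)
--     right_set = set([])
--     while not right_set.issuperset(attract_set):
--         right_index -= 1
--         right_set.update([A[right_index]])
--
--     return max(0,right_index - left_index + 1)
-- ===== SOURCE B (Python) =====
-- def solution(A):
--     n = len(A)
--     # left = 1 + last index where a brand-new value appears (0 if list empty)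
--     seen = set()
--     left = 0
--     for i, v in enumerate(A):
--         if v not in seen:
--             seen.add(v)
--             left = i + 1
--     # right = smallest "last occurrence" index = last new value seen scanning from the end (n if empty)
--     seen = set()
--     right = n
--     for j, v in enumerate(reversed(A)):
--         if v not in seen:
--             seen.add(v)
--             right = n - 1 - j
--     return max(0, right - left + 1)
-- ===== Notes on version B (the rewrite author's own statement) =====
-- stated objective: alternative
-- what changed: A grows prefix/suffix sets with a set.issuperset check on every step; B instead makes two plain passes recording the last position at which a brand-new value appears (forward pass gives 1 + max first-occurrence index, backward pass gives min last-occurrence index) and combines them with the same max(0, right - left + 1) formula.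
import Mathlib
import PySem

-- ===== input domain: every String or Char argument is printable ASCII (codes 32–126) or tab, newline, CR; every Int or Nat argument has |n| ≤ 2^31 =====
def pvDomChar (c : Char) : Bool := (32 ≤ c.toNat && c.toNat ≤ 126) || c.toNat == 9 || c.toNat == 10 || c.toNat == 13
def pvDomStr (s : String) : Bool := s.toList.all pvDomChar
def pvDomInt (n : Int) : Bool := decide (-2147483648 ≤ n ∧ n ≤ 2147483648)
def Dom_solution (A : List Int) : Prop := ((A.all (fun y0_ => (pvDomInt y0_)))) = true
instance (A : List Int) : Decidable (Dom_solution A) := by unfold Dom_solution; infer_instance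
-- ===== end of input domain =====

-- B replaces A's grow-a-set-until-it-covers-all-distinct-values scans with their
-- per-step superset checks by two plain passes recording the last position at which a
-- new value appears (= max first occurrence / min last occurrence); objective: alternative.

-- ===== PORT A =====

-- 'for item in A: if left_set.issuperset(attract_set): break; left_set.update([item]); left_index += 1'
def pvLeftLoopA (attract : PySem.Set Int) : List Int → PySem.Set Int → Int → Int
  | [], _, i => i
  | x :: xs, s, i =>
    if PySem.Set.issuperset s attract then i
    else pvLeftLoopA attract xs (PySem.Set.add s x) (i + 1)

-- 'while not right_set.issuperset(attract_set): right_index -= 1; right_set.update([A[right_index]])'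
-- The index counts down from len(A); with attract = set(A) the superset test is always
-- reached before the index passes 0, so the fuel-0 fallback branch is unreachable.
def pvRightLoopA (A : List Int) (attract : PySem.Set Int) : PySem.Set Int → Nat → Int
  | s, ri =>
    if PySem.Set.issuperset s attract then (ri : Int)
    else
      match ri with
      | 0 => 0
      | r + 1 => pvRightLoopA A attract (PySem.Set.add s (PySem.List.pyGetD A (r : Int) 0)) r

def solution (A : List Int) : Int :=
  let attract := PySem.Set.ofList A
  let leftIndex := pvLeftLoopA attract A PySem.Set.empty 0
  let rightIndex := pvRightLoopA A attract PySem.Set.empty A.length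
  max 0 (rightIndex - leftIndex + 1)

-- ===== PORT B =====

def solution_alt (A : List Int) : Int :=
  let n : Int := A.length
  -- for i, v in enumerate(A): if v not in seen: seen.add(v); left = i + 1
  let left := ((PySem.List.enumerate A 0).foldl
    (fun (st : PySem.Set Int × Int) p =>
      if PySem.Set.contains st.1 p.2 then st else (PySem.Set.add st.1 p.2, p.1 + 1))
    (PySem.Set.empty, 0)).2
  -- for j, v in enumerate(reversed(A)): if v not in seen: seen.add(v); right = n - 1 - j
  let right := ((PySem.List.enumerate A.reverse 0).foldl
    (fun (st : PySem.Set Int × Int) p =>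
      if PySem.Set.contains st.1 p.2 then st else (PySem.Set.add st.1 p.2, n - 1 - p.1))
    (PySem.Set.empty, n)).2
  max 0 (right - left + 1)

-- ===== PRECONDITION & SPEC =====
def Spec_solution (A : List Int) (out : Int) : Prop := out = solution_alt A
instance (A : List Int) (out : Int) : Decidable (Spec_solution A out) := by unfold Spec_solution; infer_instance

-- ===== CLAIM (what is proved, stated in full; the proofs are below) =====
def Claim_equal_solution : Prop := ∀ (A : List Int), Dom_solution A → Spec_solution A (solution A)

-- ===== LEMMAS AND PROOFS =====

-- Largest index (from the front, 0-based) of an element not seen before; -1 if all seen.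
def pvMni (s : PySem.Set Int) : List Int → Int
  | [] => -1
  | x :: xs =>
    let m := pvMni (PySem.Set.add s x) xs
    if 0 ≤ m then m + 1 else if x ∈ s then -1 else 0

theorem pvMni_ge (s : PySem.Set Int) (L : List Int) : -1 ≤ pvMni s L := by
  induction L generalizing s with
  | nil => simp [pvMni]
  | cons x xs ih =>
    have := ih (PySem.Set.add s x)
    show -1 ≤ (if 0 ≤ pvMni (PySem.Set.add s x) xs then pvMni (PySem.Set.add s x) xs + 1
      else if x ∈ s then -1 else 0)
    split_ifs <;> omega

theorem pvMni_eq_neg_one_iff (s : PySem.Set Int) (L : List Int) :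
    pvMni s L = -1 ↔ ∀ x ∈ L, x ∈ s := by
  induction L generalizing s with
  | nil => simp [pvMni]
  | cons x xs ih =>
    show (if 0 ≤ pvMni (PySem.Set.add s x) xs then pvMni (PySem.Set.add s x) xs + 1
      else if x ∈ s then -1 else 0) = -1 ↔ _
    have hge := pvMni_ge (PySem.Set.add s x) xs
    by_cases hm : pvMni (PySem.Set.add s x) xs = -1
    · rw [if_neg (by omega)]
      by_cases hx : x ∈ s
      · rw [if_pos hx]
        constructor
        · intro _ y hy
          rcases List.mem_cons.mp hy with rfl | hy
          · exact hx
          · have := (ih (PySem.Set.add s x)).mp hm y hy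
            rcases (PySem.Set.mem_add _ _ _).mp this with h | rfl
            · exact h
            · exact hx
        · intro _; rfl
      · rw [if_neg hx]
        constructor
        · intro h; exact absurd h (by omega)
        · intro hall; exact absurd (hall x (by simp)) hx
    · rw [if_pos (by omega)]
      constructor
      · intro h; exact absurd h (by omega)
      · intro hall
        exfalso; apply hm
        rw [ih]; intro y hy
        rw [PySem.Set.add_of_mem (hall x (by simp))]
        exact hall y (by simp [hy])

theorem pvMni_cons (s : PySem.Set Int) (x : Int) (xs : List Int) :
    pvMni s (x :: xs) =
      if 0 ≤ pvMni (PySem.Set.add s x) xs then pvMni (PySem.Set.add s x) xs + 1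
      else if x ∈ s then -1 else 0 := rfl

-- B's fold over 'enumerate', for an arbitrary index-to-accumulator map g.
theorem pvFold_enum_eq (g : Int → Int) (L : List Int) :
    ∀ (s : PySem.Set Int) (i acc : Int),
    ((PySem.List.enumerate L i).foldl
      (fun (st : PySem.Set Int × Int) p =>
        if PySem.Set.contains st.1 p.2 then st else (PySem.Set.add st.1 p.2, g p.1))
      (s, acc)).2
    = if pvMni s L = -1 then acc else g (i + pvMni s L) := by
  induction L with
  | nil => intro s i acc; simp [PySem.List.enumerate_nil, pvMni]
  | cons x xs ih =>
    intro s i acc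
    rw [PySem.List.enumerate_cons]
    simp only [List.foldl_cons]
    have hge := pvMni_ge (PySem.Set.add s x) xs
    have hge0 := pvMni_ge s xs
    by_cases hx : x ∈ s
    · have hadd : PySem.Set.add s x = s := PySem.Set.add_of_mem hx
      rw [if_pos (by simpa [PySem.Set.contains_iff] using hx)]
      rw [ih s (i + 1) acc]
      rw [pvMni_cons, hadd, if_pos hx]
      by_cases h1 : pvMni s xs = -1
      · rw [if_pos h1, if_neg (show ¬ (0:Int) ≤ pvMni s xs by omega)]
        simp
      · rw [if_neg h1, if_pos (show (0:Int) ≤ pvMni s xs by omega),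
            if_neg (show ¬ pvMni s xs + 1 = -1 by omega)]
        congr 1; ring
    · rw [if_neg (by simpa [PySem.Set.contains_iff] using hx)]
      rw [ih (PySem.Set.add s x) (i + 1) (g i)]
      rw [pvMni_cons, if_neg hx]
      by_cases h1 : pvMni (PySem.Set.add s x) xs = -1
      · rw [if_pos h1, if_neg (show ¬ (0:Int) ≤ pvMni (PySem.Set.add s x) xs by omega),
            if_neg (show ¬ (0:Int) = -1 by omega)]
        congr 1; ring
      · rw [if_neg h1, if_pos (show (0:Int) ≤ pvMni (PySem.Set.add s x) xs by omega),
            if_neg (show ¬ pvMni (PySem.Set.add s x) xs + 1 = -1 by omega)]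
        congr 1; ring

-- A's left scan: i plus the minimal prefix length of L whose values, with s, cover attract.
theorem pvLeftLoopA_eq (attract : PySem.Set Int) (L : List Int) :
    ∀ (s : PySem.Set Int) (i : Int),
    (∀ x, x ∈ attract ↔ x ∈ s ∨ x ∈ L) →
    pvLeftLoopA attract L s i = i + pvMni s L + 1 := by
  induction L with
  | nil =>
    intro s i h
    have hsup : PySem.Set.issuperset s attract = true := by
      rw [PySem.Set.issuperset_iff]
      intro x hx
      rcases (h x).mp hx with hs | hn
      · exact hs
      · simp at hn
    simp [pvLeftLoopA, pvMni]
  | cons x xs ih =>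
    intro s i h
    rw [pvLeftLoopA]
    by_cases hsup : PySem.Set.issuperset s attract = true
    · rw [if_pos hsup]
      have hall : ∀ y ∈ x :: xs, y ∈ s := by
        intro y hy
        exact (PySem.Set.issuperset_iff s attract).mp hsup y ((h y).mpr (Or.inr hy))
      have : pvMni s (x :: xs) = -1 := (pvMni_eq_neg_one_iff s (x :: xs)).mpr hall
      omega
    · rw [if_neg hsup]
      have h' : ∀ y, y ∈ attract ↔ y ∈ PySem.Set.add s x ∨ y ∈ xs := by
        intro y
        rw [h y, PySem.Set.mem_add]
        simp [List.mem_cons]; tauto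
      rw [ih (PySem.Set.add s x) (i + 1) h']
      -- relate pvMni s (x::xs) to pvMni (add s x) xs
      have hge := pvMni_ge (PySem.Set.add s x) xs
      rw [pvMni_cons]
      split_ifs with h1 h2
      · omega
      · -- tail all seen and x ∈ s: contradiction with ¬issuperset
        exfalso
        apply hsup
        rw [PySem.Set.issuperset_iff]
        intro y hy
        rcases (h y).mp hy with hs | hn
        · exact hs
        · rcases List.mem_cons.mp hn with rfl | hyxs
          · exact h2
          · have hm1 : pvMni (PySem.Set.add s x) xs = -1 := by omega
            have := (pvMni_eq_neg_one_iff _ xs).mp hm1 y hyxs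
            rcases (PySem.Set.mem_add _ _ _).mp this with h | rfl
            · exact h
            · exact h2
      · omega

-- A's right scan: counts down ri; equals ri minus the minimal suffix length of take ri covering attract.
theorem pvRightLoopA_eq (A : List Int) (attract : PySem.Set Int) :
    ∀ (ri : Nat), ri ≤ A.length → ∀ (s : PySem.Set Int),
    (∀ x, x ∈ attract ↔ x ∈ s ∨ x ∈ A.take ri) →
    pvRightLoopA A attract s ri = (ri : Int) - (pvMni s ((A.take ri).reverse) + 1) := by
  intro ri
  induction ri with
  | zero =>
    intro _ s h
    have hsup : PySem.Set.issuperset s attract = true := by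
      rw [PySem.Set.issuperset_iff]
      intro x hx
      rcases (h x).mp hx with hs | hn
      · exact hs
      · simp at hn
    rw [pvRightLoopA, if_pos hsup]
    simp [pvMni]
  | succ r ih =>
    intro hle s h
    have hr : r < A.length := by omega
    have htake : A.take (r + 1) = A.take r ++ [A[r]] := by
      rw [List.take_add_one, List.getElem?_eq_getElem hr]; rfl
    by_cases hsup : PySem.Set.issuperset s attract = true
    · rw [pvRightLoopA, if_pos hsup]
      have hall : ∀ y ∈ (A.take (r+1)).reverse, y ∈ s := by
        intro y hy
        rw [List.mem_reverse] at hy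
        exact (PySem.Set.issuperset_iff s attract).mp hsup y ((h y).mpr (Or.inr hy))
      have : pvMni s ((A.take (r+1)).reverse) = -1 := (pvMni_eq_neg_one_iff _ _).mpr hall
      omega
    · rw [pvRightLoopA, if_neg hsup]
      have hget : PySem.List.pyGetD A (r : Int) 0 = A[r] := PySem.List.pyGetD_ofNat A r 0 hr
      rw [hget]
      have h' : ∀ y, y ∈ attract ↔ y ∈ PySem.Set.add s A[r] ∨ y ∈ A.take r := by
        intro y
        rw [h y, htake, PySem.Set.mem_add]
        simp only [List.mem_append, List.mem_singleton]
        tauto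
      rw [ih (by omega) (PySem.Set.add s A[r]) h']
      have hrev : (A.take (r+1)).reverse = A[r] :: (A.take r).reverse := by
        rw [htake]; simp
      rw [hrev, pvMni_cons]
      have hge := pvMni_ge (PySem.Set.add s A[r]) ((A.take r).reverse)
      split_ifs with h1 h2
      · omega
      · exfalso
        apply hsup
        rw [PySem.Set.issuperset_iff]
        intro y hy
        rcases (h y).mp hy with hs | hn
        · exact hs
        · rw [htake] at hn
          rcases List.mem_append.mp hn with hyxs | hyx
          · have hm1 : pvMni (PySem.Set.add s A[r]) ((A.take r).reverse) = -1 := by omega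
            have := (pvMni_eq_neg_one_iff _ _).mp hm1 y (by simpa using hyxs)
            rcases (PySem.Set.mem_add _ _ _).mp this with h | rfl
            · exact h
            · exact h2
          · rw [List.mem_singleton] at hyx; subst hyx; exact h2
      · omega

-- ===== VERDICT (by name: the statement is the Claim_ definition above) =====
theorem solution_spec : Claim_equal_solution := by
  intro A _
  unfold Spec_solution solution solution_alt
  have hmemA : ∀ x, x ∈ PySem.Set.ofList A ↔ x ∈ (PySem.Set.empty : PySem.Set Int) ∨ x ∈ A := by
    intro x; simp [PySem.Set.mem_ofList, PySem.Set.empty]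
  have hL := pvLeftLoopA_eq (PySem.Set.ofList A) A PySem.Set.empty 0 hmemA
  have hR := pvRightLoopA_eq A (PySem.Set.ofList A) A.length (le_refl _) PySem.Set.empty
    (by intro x; simp only [List.take_length]; exact hmemA x)
  rw [List.take_length] at hR
  have hBL := pvFold_enum_eq (fun i => i + 1) A PySem.Set.empty 0 0
  have hBR := pvFold_enum_eq (fun j => (A.length : Int) - 1 - j) A.reverse PySem.Set.empty 0 (A.length : Int)
  simp only []
  rw [hL, hR, hBL, hBR]
  have g1 := pvMni_ge PySem.Set.empty A
  have g2 := pvMni_ge PySem.Set.empty A.reverse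
  split_ifs <;> omega
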